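-- pv_equiv track=rewrite | github.com/Uklusi/AdventOfCode | 2024/07/AoC.py | check_equation_p2
-- ===== SOURCE A (Python) =====
-- def check_equation_p2(test_value: int, operands: list[int]) -> bool:
--     if len(operands) == 1:
--         return operands[0] == test_value
--
--     if test_value <= 0:
--         return False
--
--     n = operands.pop()
--
--     res = False
--
--     (quot, rem) = divmod(test_value, n)
--     if rem == 0:
--         res = res or check_equation_p2(quot, operands.copy())
--
--     strval = str(test_value)
--     strn = str(n)
--     if strval.endswith(strn) and len(strval) > len(strn):
--         val1 = int(strval[: -len(strn)])
--         res = res or check_equation_p2(val1, operands.copy())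
--
--     return res or check_equation_p2(test_value - n, operands.copy())
-- ===== SOURCE B (Python) =====
-- # B: explicit worklist (stack of (value, operand-tuple) states) instead of A's recursion;
-- # return value only: unlike A, B does not pop the last element off the caller's list.
-- def check_equation_p2(test_value: int, operands: list[int]) -> bool:
--     stack = [(test_value, tuple(operands))]
--     while stack:
--         t, ops = stack.pop()
--         if len(ops) == 1:
--             if ops[0] == t:
--                 return True
--             continue
--         if t <= 0:
--             continue
--         n = ops[-1]
--         rest = ops[:-1]
--         quot, rem = divmod(t, n)
--         if rem == 0:
--             stack.append((quot, rest))
--         strval = str(t)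
--         strn = str(n)
--         if strval.endswith(strn) and len(strval) > len(strn):
--             stack.append((int(strval[: -len(strn)]), rest))
--         stack.append((t - n, rest))
--     return False
-- ===== Notes on version B (the rewrite author's own statement) =====
-- stated objective: alternative
-- what changed: A's branching recursion is replaced by an iterative worklist: a stack of (value, remaining-operands) states is popped in a loop, each non-base state pushing its division/concatenation/subtraction successors, returning True on the first base-case hit; B also leaves the argument list unmutated where A pops its last element.
-- outside the precondition, e.g. on check_equation_p2(3, [5, 0, 7]): A returns False, B returns False
import Mathlib
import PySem

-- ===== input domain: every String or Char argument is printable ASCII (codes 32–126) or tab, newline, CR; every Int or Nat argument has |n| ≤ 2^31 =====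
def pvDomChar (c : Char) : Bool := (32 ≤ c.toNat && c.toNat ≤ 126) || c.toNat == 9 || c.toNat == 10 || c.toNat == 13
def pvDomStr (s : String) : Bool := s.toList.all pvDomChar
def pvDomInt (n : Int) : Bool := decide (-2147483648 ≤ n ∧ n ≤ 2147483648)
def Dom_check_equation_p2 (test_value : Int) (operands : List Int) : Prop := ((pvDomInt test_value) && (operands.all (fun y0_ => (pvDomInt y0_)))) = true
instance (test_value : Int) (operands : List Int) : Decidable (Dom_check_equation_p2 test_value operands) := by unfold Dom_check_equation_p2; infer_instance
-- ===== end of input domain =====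

-- B replaces A's recursion by an explicit worklist of (value, operands) states (alternative
-- decomposition, same cost); equivalence is about the RETURN value only: A pops the last
-- element off the caller's list at the top level, B leaves the argument list untouched.

-- ===== PORT A =====
-- Literal transliteration of A's recursion; the `none` branches are exactly where the
-- Python raises (IndexError on pop of [], ZeroDivisionError in divmod) — excluded by Pre_.
def check_equation_p2 (test_value : Int) (operands : List Int) : Bool :=
  if operands.length = 1 then
    PySem.List.pyGetD operands 0 0 == test_value
  else if test_value ≤ 0 then
    false
  else
    match hlast : operands.getLast? with
    | none => false  -- operands.pop() raises IndexError here; outside Pre_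
    | some n =>
      let ops := operands.dropLast
      match PySem.Int.divmod? test_value n with
      | none => false  -- divmod(test_value, 0) raises ZeroDivisionError; outside Pre_
      | some qr =>
        let res := false
        let res := if qr.2 = 0 then res || check_equation_p2 qr.1 ops else res
        let strval := PySem.Int.toChars test_value
        let strn := PySem.Int.toChars n
        let res := if PySem.Chars.endswith strval strn ∧ strval.length > strn.length then
            res || check_equation_p2
              ((PySem.Int.ofChars? (PySem.List.slice strval none (some (-(strn.length : Int))))).getD 0) ops
          else res
        res || check_equation_p2 (test_value - n) ops
termination_by operands.length
decreasing_by
  all_goals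
    have hne : operands ≠ [] := by intro hnil; rw [hnil] at hlast; simp at hlast
    rw [List.length_dropLast]
    exact Nat.sub_lt (List.length_pos_of_ne_nil hne) Nat.one_pos

-- ===== PORT B =====
-- Transliteration of B's while-loop over the stack; the stack head is the Python list's
-- last element (pop/append at the head).  The `none`/skip branches are exactly where the
-- Python raises — outside Pre_.  The fuel argument is a totality guard only: started at
-- pvFuel it never runs out (pvAltLoop_eq_any below is proved for every sufficient fuel).
def pvAltLoop (fuel : Nat) (stack : List (Int × List Int)) : Bool :=
  match fuel, stack with
  | _, [] => false
  | 0, _ => false  -- fuel exhausted; unreachable from check_equation_p2_alt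
  | fuel + 1, (t, ops) :: rest =>
    if ops.length = 1 then
      if PySem.List.pyGetD ops 0 0 == t then true else pvAltLoop fuel rest
    else if t ≤ 0 then pvAltLoop fuel rest
    else
      match ops.getLast? with
      | none => pvAltLoop fuel rest  -- ops[-1] raises IndexError here; outside Pre_
      | some n =>
        let tail := ops.dropLast
        let stack1 := match PySem.Int.divmod? t n with
          | none => rest  -- divmod(t, 0) raises ZeroDivisionError; outside Pre_
          | some qr => if qr.2 = 0 then (qr.1, tail) :: rest else rest
        let strval := PySem.Int.toChars t
        let strn := PySem.Int.toChars n
        let stack2 := if PySem.Chars.endswith strval strn ∧ strval.length > strn.length then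
            ((PySem.Int.ofChars? (PySem.List.slice strval none (some (-(strn.length : Int))))).getD 0, tail) :: stack1
          else stack1
        pvAltLoop fuel ((t - n, tail) :: stack2)

-- an upper bound on the number of loop iterations, used as the fuel
def pvMeasure (stack : List (Int × List Int)) : Nat :=
  (stack.map (fun s => 4 ^ s.2.length)).sum

def check_equation_p2_alt (test_value : Int) (operands : List Int) : Bool :=
  pvAltLoop (pvMeasure [(test_value, operands)]) [(test_value, operands)]

-- ===== PRECONDITION & SPEC =====
-- Pre_ excludes (a) empty operand lists with positive test_value, where A raises IndexError,
-- and (b) for positive test_value, lists containing 0 after the first element: there A's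
-- unconditional divmod can raise ZeroDivisionError, and because A and B explore the branch
-- tree in different orders they need not raise on the same such inputs (on some of them A
-- still returns, see cites).
def Pre_check_equation_p2 (test_value : Int) (operands : List Int) : Prop :=
  (operands = [] → test_value ≤ 0) ∧ (0 < test_value → ¬ (0 ∈ operands.drop 1))
instance (test_value : Int) (operands : List Int) : Decidable (Pre_check_equation_p2 test_value operands) := by unfold Pre_check_equation_p2; infer_instance

def pvWitness_check_equation_p2 : Int × List Int := (190, [19, 10])

def Spec_check_equation_p2 (test_value : Int) (operands : List Int) (out : Bool) : Prop := out = check_equation_p2_alt test_value operands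
instance (test_value : Int) (operands : List Int) (out : Bool) : Decidable (Spec_check_equation_p2 test_value operands out) := by unfold Spec_check_equation_p2; infer_instance

-- ===== CLAIM (what is proved, stated in full; the proofs are below) =====
def Claim_equal_check_equation_p2 : Prop := ∀ (test_value : Int) (operands : List Int), Dom_check_equation_p2 test_value operands → Pre_check_equation_p2 test_value operands → Spec_check_equation_p2 test_value operands (check_equation_p2 test_value operands)

-- ===== LEMMAS AND PROOFS =====

-- membership in the shrunken list's tail lifts to the original list's tail
lemma pv_mem_drop_dropLast {x : Int} {ops : List Int}
    (h : x ∈ ops.dropLast.drop 1) : x ∈ ops.drop 1 :=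
  ((List.dropLast_sublist ops).drop 1).mem h

-- the last element of a list of length ≥ 2 lies in its tail
lemma pv_getLast_mem_drop_one {n : Int} {ops : List Int}
    (h : ops.getLast? = some n) (h2 : ops.length ≠ 1) : n ∈ ops.drop 1 := by
  match ops, h with
  | [], h => simp at h
  | [a], _ => simp at h2
  | a :: b :: l, h =>
    rw [List.getLast?_cons_cons] at h
    simpa using List.mem_of_getLast? h

-- unfolding lemmas for A's recursion, one per branch of its body
lemma pv_checkA_len1 {t : Int} {ops : List Int} (h : ops.length = 1) :
    check_equation_p2 t ops = (PySem.List.pyGetD ops 0 0 == t) := by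
  rw [check_equation_p2, if_pos h]

lemma pv_checkA_neg {t : Int} {ops : List Int} (h1 : ops.length ≠ 1) (h2 : t ≤ 0) :
    check_equation_p2 t ops = false := by
  rw [check_equation_p2, if_neg h1, if_pos h2]

lemma pv_checkA_nil {t : Int} {ops : List Int} (h1 : ops.length ≠ 1) (h2 : ¬ t ≤ 0)
    (h3 : ops.getLast? = none) : check_equation_p2 t ops = false := by
  rw [check_equation_p2, if_neg h1, if_neg h2]
  split
  · rfl
  · rename_i n' heq
    rw [h3] at heq
    exact absurd heq (by simp)

lemma pv_checkA_step {t n : Int} {ops : List Int} (h1 : ops.length ≠ 1) (h2 : ¬ t ≤ 0)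
    (h3 : ops.getLast? = some n) (h4 : n ≠ 0) :
    check_equation_p2 t ops =
      ((if PySem.Chars.endswith (PySem.Int.toChars t) (PySem.Int.toChars n) ∧
            (PySem.Int.toChars t).length > (PySem.Int.toChars n).length then
          (if t.fmod n = 0 then
            false || check_equation_p2 (t.fdiv n) ops.dropLast else false) ||
            check_equation_p2
              ((PySem.Int.ofChars? (PySem.List.slice (PySem.Int.toChars t) none
                (some (-((PySem.Int.toChars n).length : Int))))).getD 0) ops.dropLast
        else
          (if t.fmod n = 0 then
            false || check_equation_p2 (t.fdiv n) ops.dropLast else false)) ||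
        check_equation_p2 (t - n) ops.dropLast) := by
  rw [check_equation_p2, if_neg h1, if_neg h2]
  split
  · rename_i heq
    rw [h3] at heq
    exact absurd heq (by simp)
  · rename_i n' heq
    rw [h3] at heq
    injection heq with heq
    subst heq
    simp only [PySem.Int.divmod?, if_neg h4]

-- the worklist computes the disjunction of A's recursion over its states, for ANY
-- sufficient fuel, provided no state can reach a division by zero (no 0 after the
-- first element of the operand list of any state whose value is positive)
lemma pvAltLoop_eq_any (fuel : Nat) (st : List (Int × List Int))
    (hfuel : pvMeasure st ≤ fuel)
    (hinv : ∀ s ∈ st, 0 < s.1 → 0 ∉ s.2.drop 1) :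
    pvAltLoop fuel st = st.any (fun s => check_equation_p2 s.1 s.2) := by
  induction fuel generalizing st with
  | zero =>
    match st with
    | [] => rfl
    | (t, ops) :: rest =>
      exfalso
      have hp : 0 < 4 ^ ops.length := Nat.pow_pos (by decide)
      simp only [pvMeasure, List.map_cons, List.sum_cons] at hfuel
      omega
  | succ fuel ih =>
    match st with
    | [] => rfl
    | (t, ops) :: rest =>
      have hp : 0 < 4 ^ ops.length := Nat.pow_pos (by decide)
      simp only [pvMeasure, List.map_cons, List.sum_cons] at hfuel
      have hrest : ∀ s ∈ rest, 0 < s.1 → 0 ∉ s.2.drop 1 := fun s hs =>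
        hinv s (List.mem_cons_of_mem _ hs)
      have hrestm : pvMeasure rest ≤ fuel := by
        simp only [pvMeasure]; omega
      simp only [List.any_cons]
      by_cases hlen : ops.length = 1
      · rw [pv_checkA_len1 hlen]
        by_cases heq : (PySem.List.pyGetD ops 0 0 == t) = true
        · rw [pvAltLoop, if_pos hlen, if_pos heq]
          simp [heq]
        · rw [pvAltLoop, if_pos hlen, if_neg heq, ih rest hrestm hrest]
          simp [heq]
      · by_cases hpos : t ≤ 0
        · rw [pv_checkA_neg hlen hpos, pvAltLoop, if_neg hlen, if_pos hpos,
            ih rest hrestm hrest]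
          simp
        · match hlast : ops.getLast? with
          | none =>
            rw [pv_checkA_nil hlen hpos hlast, pvAltLoop, if_neg hlen, if_neg hpos, hlast,
              ih rest hrestm hrest]
            simp
          | some n =>
            have hmem : n ∈ ops.drop 1 := pv_getLast_mem_drop_one hlast hlen
            have hdrop : 0 ∉ ops.drop 1 := hinv (t, ops) List.mem_cons_self (by omega)
            have htail : 0 ∉ ops.dropLast.drop 1 := fun hx => hdrop (pv_mem_drop_dropLast hx)
            have hn0 : n ≠ 0 := fun h0 => hdrop (h0 ▸ hmem)
            have hne : ops ≠ [] := by intro hnil; rw [hnil] at hlast; simp at hlast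
            have hlp := List.length_pos_of_ne_nil hne
            have hpow : 3 * 4 ^ (ops.length - 1) < 4 ^ ops.length := by
              have h4 : 4 ^ ops.length = 4 * 4 ^ (ops.length - 1) := by
                rw [← pow_succ']; congr 1; omega
              have ha : 0 < 4 ^ (ops.length - 1) := Nat.pow_pos (by decide)
              omega
            -- the inner worklist after one step, with the divmod match reduced
            have hS1 : ∀ s ∈ (if t.fmod n = 0 then (t.fdiv n, ops.dropLast) :: rest else rest),
                0 < s.1 → 0 ∉ s.2.drop 1 := by
              split
              · intro s hs
                rcases List.mem_cons.mp hs with rfl | hs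
                · exact fun _ => htail
                · exact hrest _ hs
              · exact hrest
            have hS2 : ∀ s ∈ (if PySem.Chars.endswith (PySem.Int.toChars t) (PySem.Int.toChars n) ∧
                  (PySem.Int.toChars t).length > (PySem.Int.toChars n).length then
                ((PySem.Int.ofChars? (PySem.List.slice (PySem.Int.toChars t) none
                    (some (-((PySem.Int.toChars n).length : Int))))).getD 0, ops.dropLast) ::
                  (if t.fmod n = 0 then (t.fdiv n, ops.dropLast) :: rest else rest)
              else
                (if t.fmod n = 0 then (t.fdiv n, ops.dropLast) :: rest else rest)),
                0 < s.1 → 0 ∉ s.2.drop 1 := by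
              split
              · intro s hs
                rcases List.mem_cons.mp hs with rfl | hs
                · exact fun _ => htail
                · exact hS1 _ hs
              · exact hS1
            have hm : pvMeasure ((t - n, ops.dropLast) ::
                (if PySem.Chars.endswith (PySem.Int.toChars t) (PySem.Int.toChars n) ∧
                    (PySem.Int.toChars t).length > (PySem.Int.toChars n).length then
                  ((PySem.Int.ofChars? (PySem.List.slice (PySem.Int.toChars t) none
                      (some (-((PySem.Int.toChars n).length : Int))))).getD 0, ops.dropLast) ::
                    (if t.fmod n = 0 then (t.fdiv n, ops.dropLast) :: rest else rest)
                else
                  (if t.fmod n = 0 then (t.fdiv n, ops.dropLast) :: rest else rest))) ≤ fuel := by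
              simp only [pvMeasure]
              split <;> split <;>
                simp only [List.map_cons, List.sum_cons, List.length_dropLast] <;> omega
            rw [pv_checkA_step hlen hpos hlast hn0,
              pvAltLoop, if_neg hlen, if_neg hpos, hlast]
            simp only [PySem.Int.divmod?, if_neg hn0]
            rw [ih _ hm (by
              intro s hs
              rcases List.mem_cons.mp hs with rfl | hs
              · exact fun _ => htail
              · exact hS2 _ hs)]
            by_cases hrem : (t.fmod n = 0) <;>
              by_cases hcat : (PySem.Chars.endswith (PySem.Int.toChars t) (PySem.Int.toChars n) = true ∧
                (PySem.Int.toChars t).length > (PySem.Int.toChars n).length) <;>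
              simp [hrem, hcat, List.any_cons, Bool.or_assoc, Bool.or_comm, Bool.or_left_comm]

theorem pv_main (test_value : Int) (operands : List Int)
    (hpre : Pre_check_equation_p2 test_value operands) :
    check_equation_p2 test_value operands = check_equation_p2_alt test_value operands := by
  rw [check_equation_p2_alt,
    pvAltLoop_eq_any _ [(test_value, operands)] le_rfl (by
      intro s hs
      rcases List.mem_cons.mp hs with rfl | hs
      · exact fun h0 => hpre.2 h0
      · simp at hs)]
  simp

-- ===== VERDICT (by name: the statement is the Claim_ definition above) =====
theorem check_equation_p2_spec : Claim_equal_check_equation_p2 := by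
  intro t ops _ hpre
  unfold Spec_check_equation_p2
  exact pv_main t ops hpre
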